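-- pv_equiv track=rewrite | github.com/posl/comment_recommendation | script/split_gen/5_time/en/251_B/9.py | find_good_integers
-- ===== SOURCE A (Python) =====
-- def find_good_integers(N, W, A):
--     max_A = max(A)
--     max_sum = max_A * 3
--     if max_sum < W:
--         return N
--     else:
--         good_integers = [0] * (max_sum + 1)
--         for i in range(N):
--             for j in range(i, N):
--                 for k in range(j, N):
--                     good_integers[A[i] + A[j] + A[k]] += 1
--         return good_integers[:W+1].count(0)
-- ===== SOURCE B (Python) =====
-- def find_good_integers(N, W, A):
--     mx = max(A)
--     if 3 * mx < W:
--         return N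
--     # bitset of values among the first N elements
--     vals = 0
--     for i in range(N):
--         vals |= 1 << A[i]
--     # sumset(x, y): bitset of a+b for bit a of x, bit b of y
--     def sumset(x, y):
--         r = 0
--         sh = 0
--         while y:
--             if y & 1:
--                 r |= x << sh
--             y >>= 1
--             sh += 1
--         return r
--     s3 = sumset(sumset(vals, vals), vals)
--     cnt = 0
--     for t in range(W + 1):
--         if not (s3 >> t) & 1:
--             cnt += 1
--     return cnt
-- ===== Notes on version B (the rewrite author's own statement) =====
-- stated objective: alternative
-- what changed: The cubic loop over index triples i<=j<=k that increments a tally array is replaced by a big-integer bitset: one pass sets bit a for each value a among the first N elements, the bitset is shift/or sum-set-convolved with itself twice, and the answer counts clear bits among positions 0..W.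
-- outside the precondition, e.g. on find_good_integers(2, 6, [-1, 2]): A returns 3, B raises ValueError; on find_good_integers(1, -2, [5]): A returns 15, B returns 0
import Mathlib
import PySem

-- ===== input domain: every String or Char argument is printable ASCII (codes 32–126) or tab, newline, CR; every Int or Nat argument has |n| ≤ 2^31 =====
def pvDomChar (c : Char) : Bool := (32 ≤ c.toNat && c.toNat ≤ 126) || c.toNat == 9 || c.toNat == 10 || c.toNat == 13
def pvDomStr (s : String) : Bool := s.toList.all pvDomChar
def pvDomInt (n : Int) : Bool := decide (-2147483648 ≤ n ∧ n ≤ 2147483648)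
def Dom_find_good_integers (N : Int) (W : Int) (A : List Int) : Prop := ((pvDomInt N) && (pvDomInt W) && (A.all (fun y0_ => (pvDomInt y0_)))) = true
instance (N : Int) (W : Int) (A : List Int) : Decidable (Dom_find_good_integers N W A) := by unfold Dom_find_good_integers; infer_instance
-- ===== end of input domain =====

-- B replaces A's cubic loop over index triples by a big-integer bitset sum-set
-- (the value bitset is shift/or-convolved with itself twice), then counts clear
-- bits among positions 0..W; proved equal to A on Pre_ below.

-- ===== PORT A =====
-- good_integers[idx] += 1 with Python index semantics (a negative idx counts from
-- the end); an out-of-range idx raises IndexError in Python and is excluded by Pre_.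
def pyIncr (g : List Int) (idx : Int) : List Int :=
  let i := if idx < 0 then idx + (g.length : Int) else idx
  if 0 ≤ i ∧ i < (g.length : Int) then g.set i.toNat ((g[i.toNat]?).getD 0 + 1) else g

def find_good_integers (N : Int) (W : Int) (A : List Int) : Int :=
  let max_A := (PySem.List.max? A (fun x => x)).getD 0
  let max_sum := max_A * 3
  if max_sum < W then N
  else
    let g0 : List Int := List.replicate (max_sum + 1).toNat 0
    let g := (PySem.List.pyRange 0 N 1).foldl (fun g i =>
      (PySem.List.pyRange i N 1).foldl (fun g j =>
        (PySem.List.pyRange j N 1).foldl (fun g k =>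
          pyIncr g (PySem.List.pyGetD A i 0 + PySem.List.pyGetD A j 0 + PySem.List.pyGetD A k 0)) g) g) g0
    ((PySem.List.slice g none (some (W + 1))).count 0 : Int)

-- ===== PORT B =====
-- sumset(x, y): r = 0; sh = 0; while y: (if y & 1: r |= x << sh); y >>= 1; sh += 1
def sumsetAux (x y sh r : Nat) : Nat :=
  if y = 0 then r
  else sumsetAux x (y >>> 1) (sh + 1) (if y &&& 1 = 1 then r ||| (x <<< sh) else r)
  termination_by y
  decreasing_by simpa [Nat.shiftRight_one] using Nat.div_lt_self (by omega) one_lt_two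

def find_good_integers_alt (N : Int) (W : Int) (A : List Int) : Int :=
  let mx := (PySem.List.max? A (fun x => x)).getD 0
  if 3 * mx < W then N
  else
    let vals := (PySem.List.pyRange 0 N 1).foldl
      (fun v i => v ||| (1 <<< (PySem.List.pyGetD A i 0).toNat)) 0
    let s3 := sumsetAux (sumsetAux vals vals 0 0) vals 0 0
    (PySem.List.pyRange 0 (W + 1) 1).foldl
      (fun c t => if (s3 >>> t.toNat) &&& 1 = 0 then c + 1 else c) 0


-- ===== PRECONDITION & SPEC =====
-- Pre_ keeps the problem's natural domain: A nonempty and — unless the loop body is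
-- never reached (3*max(A) < W returns N untouched, or N ≤ 0 runs no iteration) —
-- -1 ≤ W, N ≤ len(A) and nonnegative elements.  Outside it A raises (max of the
-- empty list, IndexError for N > len(A)), or on W ≤ -2 / negative elements returns
-- accidental counts via slice/negative-index wraparound, where B raises (negative
-- shift) or returns the plain empty-range count.
def Pre_find_good_integers (N : Int) (W : Int) (A : List Int) : Prop :=
  A ≠ [] ∧ (3 * (PySem.List.max? A (fun x => x)).getD 0 < W ∨
    (-1 ≤ W ∧ (N ≤ 0 ∨ (N ≤ (A.length : Int) ∧ ∀ a ∈ A, 0 ≤ a))))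
instance (N : Int) (W : Int) (A : List Int) : Decidable (Pre_find_good_integers N W A) := by
  unfold Pre_find_good_integers; infer_instance

def pvWitness_find_good_integers : Int × Int × List Int := (2, 3, [1, 2])

def Spec_find_good_integers (N : Int) (W : Int) (A : List Int) (out : Int) : Prop := out = find_good_integers_alt N W A
instance (N : Int) (W : Int) (A : List Int) (out : Int) : Decidable (Spec_find_good_integers N W A out) := by unfold Spec_find_good_integers; infer_instance

-- ===== CLAIM (what is proved, stated in full; the proofs are below) =====
def Claim_equal_find_good_integers : Prop := ∀ (N : Int) (W : Int) (A : List Int), Dom_find_good_integers N W A → Pre_find_good_integers N W A → Spec_find_good_integers N W A (find_good_integers N W A)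

-- ===== LEMMAS AND PROOFS =====

theorem pyIncr_length (g : List Int) (x : Int) : (pyIncr g x).length = g.length := by
  unfold pyIncr; split <;> (dsimp only []; split <;> simp)

theorem foldl_pyIncr_length (L : List Int) (g : List Int) :
    (L.foldl pyIncr g).length = g.length := by
  induction L generalizing g with
  | nil => rfl
  | cons x L ih => simp [List.foldl_cons, ih, pyIncr_length]

theorem pyIncr_of_range (g : List Int) (x : Int) (h0 : 0 ≤ x) (h1 : x < (g.length : Int)) :
    pyIncr g x = g.set x.toNat ((g[x.toNat]?).getD 0 + 1) := by
  unfold pyIncr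
  rw [if_neg (show ¬ x < 0 by omega)]
  rw [if_pos ⟨h0, h1⟩]

theorem getD_mem {g : List Int} {n : Nat} (h : n < g.length) : (g[n]?).getD 0 ∈ g := by
  rw [List.getElem?_eq_getElem h]
  exact List.getElem_mem h

theorem foldl_pyIncr_getD (L : List Int) (g : List Int) (t : Nat)
    (ht : t < g.length) (hg : ∀ e ∈ g, 0 ≤ e)
    (hL : ∀ x ∈ L, 0 ≤ x ∧ x < (g.length : Int)) :
    (((L.foldl pyIncr g)[t]?).getD 0 = 0 ↔ ((g[t]?).getD 0 = 0 ∧ (t : Int) ∉ L)) := by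
  induction L generalizing g with
  | nil => simp
  | cons x L ih =>
    obtain ⟨hx0, hx1⟩ := hL x (by simp)
    rw [List.foldl_cons, pyIncr_of_range g x hx0 hx1]
    set g' := g.set x.toNat ((g[x.toNat]?).getD 0 + 1) with hg'
    have hlen : g'.length = g.length := by simp [hg']
    have hmem : ∀ e ∈ g', 0 ≤ e := by
      intro e he
      rcases List.mem_or_eq_of_mem_set he with h | h
      · exact hg e h
      · have := hg _ (getD_mem (show x.toNat < g.length by omega))
        omega
    rw [ih g' (by omega) hmem (by intro y hy; have := hL y (by simp [hy]); omega)]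
    by_cases hxt : x.toNat = t
    · have hxe : x = (t : Int) := by omega
      have h1 : (g'[t]?).getD 0 = (g[t]?).getD 0 + 1 := by
        rw [hg', List.getElem?_set, if_pos hxt, if_pos (by omega), hxt]
        simp
      have h2 : 0 ≤ (g[t]?).getD 0 := hg _ (getD_mem ht)
      constructor
      · rintro ⟨ha, -⟩; omega
      · rintro ⟨-, hb⟩; exact absurd (by simp [hxe]) hb
    · have hne : ¬ ((t : Int) = x) := by omega
      have h1 : (g'[t]?).getD 0 = (g[t]?).getD 0 := by
        rw [hg', List.getElem?_set, if_neg hxt]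
      rw [h1]
      simp only [List.mem_cons]
      constructor <;> rintro ⟨ha, hb⟩ <;> exact ⟨ha, by tauto⟩

theorem testBit_shiftLeft_iff (x sh t : Nat) :
    ((x <<< sh).testBit t = true) ↔ ∃ a, x.testBit a = true ∧ a + sh = t := by
  rw [Nat.testBit_shiftLeft]
  constructor
  · intro h
    simp only [Bool.and_eq_true, decide_eq_true_eq] at h
    exact ⟨t - sh, h.2, by omega⟩
  · rintro ⟨a, ha, rfl⟩
    simp only [Bool.and_eq_true, decide_eq_true_eq]
    exact ⟨by omega, by simpa [Nat.add_sub_cancel] using ha⟩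

theorem testBit_sumsetAux (x : Nat) (y sh r t : Nat) :
    ((sumsetAux x y sh r).testBit t = true) ↔
      (r.testBit t = true ∨ ∃ a b, x.testBit a = true ∧ y.testBit b = true ∧ a + b + sh = t) := by
  induction y using Nat.strong_induction_on generalizing sh r with
  | _ y ih =>
    rw [sumsetAux]
    by_cases hy : y = 0
    · simp [hy]
    · rw [if_neg hy]
      have hlt : y >>> 1 < y := by
        simpa [Nat.shiftRight_one] using Nat.div_lt_self (by omega) one_lt_two
      rw [ih (y >>> 1) hlt]
      have hsr : ∀ b, (y >>> 1).testBit b = y.testBit (b + 1) := by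
        intro b; rw [Nat.testBit_shiftRight, Nat.add_comm]
      have hbit0 : (y &&& 1 = 1) ↔ y.testBit 0 = true := by
        simp [Nat.and_one_is_mod, Nat.testBit_zero]
      by_cases h0 : y.testBit 0 = true
      · rw [if_pos (hbit0.mpr h0)]
        simp only [Nat.testBit_or, Bool.or_eq_true]
        constructor
        · rintro ((hr | hs) | ⟨a, b, hxa, hyb, hab⟩)
          · exact Or.inl hr
          · obtain ⟨a, ha, rfl⟩ := (testBit_shiftLeft_iff x sh t).mp hs
            exact Or.inr ⟨a, 0, ha, h0, by omega⟩
          · rw [hsr] at hyb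
            exact Or.inr ⟨a, b + 1, hxa, hyb, by omega⟩
        · rintro (hr | ⟨a, b, hxa, hyb, hab⟩)
          · exact Or.inl (Or.inl hr)
          · rcases b with _ | b
            · exact Or.inl (Or.inr ((testBit_shiftLeft_iff x sh t).mpr ⟨a, hxa, by omega⟩))
            · exact Or.inr ⟨a, b, hxa, by rw [hsr]; exact hyb, by omega⟩
      · rw [if_neg (fun h => h0 (hbit0.mp h))]
        constructor
        · rintro (hr | ⟨a, b, hxa, hyb, hab⟩)
          · exact Or.inl hr
          · rw [hsr] at hyb
            exact Or.inr ⟨a, b + 1, hxa, hyb, by omega⟩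
        · rintro (hr | ⟨a, b, hxa, hyb, hab⟩)
          · exact Or.inl hr
          · rcases b with _ | b
            · exact absurd hyb h0
            · exact Or.inr ⟨a, b, hxa, by rw [hsr]; exact hyb, by omega⟩

theorem testBit_foldl_or' {α : Type} (l : List α) (h : α → Nat) (v : Nat) (b : Nat) :
    ((l.foldl (fun v e => v ||| 1 <<< h e) v).testBit b = true) ↔
      (v.testBit b = true ∨ ∃ e ∈ l, h e = b) := by
  induction l generalizing v with
  | nil => simp
  | cons e l ih =>
    rw [List.foldl_cons, ih]
    simp only [Nat.testBit_or, Bool.or_eq_true, List.mem_cons]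
    have he : ((1 <<< h e).testBit b = true) ↔ b = h e := by
      rw [testBit_shiftLeft_iff]
      constructor
      · rintro ⟨a, ha, rfl⟩
        rcases a with _ | a
        · omega
        · simp [Nat.testBit_succ] at ha
      · rintro rfl
        exact ⟨0, by simp, by omega⟩
    constructor
    · rintro ((hv | hs) | ⟨x, hx, rfl⟩)
      · exact Or.inl hv
      · exact Or.inr ⟨e, Or.inl rfl, (he.mp hs).symm⟩
      · exact Or.inr ⟨x, Or.inr hx, rfl⟩
    · rintro (hv | ⟨x, (rfl | hx), hxb⟩)
      · exact Or.inl (Or.inl hv)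
      · exact Or.inl (Or.inr (he.mpr hxb.symm))
      · exact Or.inr ⟨x, hx, hxb⟩

theorem count_zero_take (g : List Int) (w : Nat) (hw : w ≤ g.length) :
    (g.take w).count 0 = (List.range w).countP (fun t => (g[t]?).getD 0 == 0) := by
  induction w with
  | zero => simp
  | succ w ih =>
    rw [List.take_add_one, List.range_succ, List.count_append, List.countP_append, ih (by omega)]
    have h : w < g.length := by omega
    rw [List.getElem?_eq_getElem h]
    simp only [List.countP_cons, Option.toList_some, List.count_cons, List.count_nil]
    simp [List.getElem?_eq_getElem h]

theorem exists_ordered_triple (n : Nat) (f : Nat → Int) (t : Int)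
    (h : ∃ i j k, i < n ∧ j < n ∧ k < n ∧ f i + f j + f k = t) :
    ∃ i j k, i ≤ j ∧ j ≤ k ∧ k < n ∧ f i + f j + f k = t := by
  obtain ⟨i, j, k, hi, hj, hk, hs⟩ := h
  rcases Nat.le_total i j with hij | hij <;> rcases Nat.le_total j k with hjk | hjk <;>
    rcases Nat.le_total i k with hik | hik <;>
    first
      | exact ⟨i, j, k, by omega, by omega, by omega, by omega⟩
      | exact ⟨i, k, j, by omega, by omega, by omega, by omega⟩
      | exact ⟨j, i, k, by omega, by omega, by omega, by omega⟩
      | exact ⟨j, k, i, by omega, by omega, by omega, by omega⟩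
      | exact ⟨k, i, j, by omega, by omega, by omega, by omega⟩
      | exact ⟨k, j, i, by omega, by omega, by omega, by omega⟩

theorem foldl_foldl {α β γ : Type} (xs : List α) (f : α → List β) (step : γ → β → γ) (init : γ) :
    xs.foldl (fun g a => (f a).foldl step g) init = (xs.flatMap f).foldl step init := by
  induction xs generalizing init with
  | nil => rfl
  | cons x xs ih => simp [List.flatMap_cons, List.foldl_append, ih]
theorem main_equiv (N W : Int) (A : List Int) (hne : A ≠ [])
    (hcase : 3 * (PySem.List.max? A (fun x => x)).getD 0 < W ∨
      (-1 ≤ W ∧ (N ≤ 0 ∨ (N ≤ (A.length : Int) ∧ ∀ a ∈ A, 0 ≤ a)))) :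
    find_good_integers N W A = find_good_integers_alt N W A := by
  unfold find_good_integers find_good_integers_alt
  simp only []
  set mA := (PySem.List.max? A (fun x => x)).getD 0 with hmA
  by_cases hbr : mA * 3 < W
  · rw [if_pos hbr, if_pos (by omega)]
  · rw [if_neg hbr, if_neg (by omega)]
    rcases hcase with h | ⟨hW, hrest⟩
    · exact absurd (by omega) hbr
    have hmax : ∀ a ∈ A, a ≤ mA := by
      have h1 : PySem.List.max? A (fun x => x) ≠ none := by
        intro h; exact hne ((PySem.List.max?_eq_none_iff A (fun x => x)).mp h)
      obtain ⟨m, hm⟩ := Option.ne_none_iff_exists'.mp h1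
      intro a ha
      have := PySem.List.max?_isMax hm a ha
      simpa [hmA, hm] using this
    have hmA0 : 0 ≤ mA := by omega
    -- abbreviations
    have hval : ∀ i : Int, 0 ≤ i → i < N →
        0 ≤ PySem.List.pyGetD A i 0 ∧ PySem.List.pyGetD A i 0 ≤ mA := by
      intro i h0 h1
      rcases hrest with hN0 | ⟨hN, hpos⟩
      · omega
      · rw [PySem.List.pyGetD_eq_getElem A 0 h0 (by omega)]
        have hm : A[i.toNat] ∈ A := List.getElem_mem (by omega)
        exact ⟨hpos _ hm, hmax _ hm⟩
    set g0 : List Int := List.replicate (mA * 3 + 1).toNat 0 with hg0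
    set L : List Int := (PySem.List.pyRange 0 N 1).flatMap (fun i =>
      (PySem.List.pyRange i N 1).flatMap (fun j =>
        (PySem.List.pyRange j N 1).map (fun k =>
          PySem.List.pyGetD A i 0 + PySem.List.pyGetD A j 0 + PySem.List.pyGetD A k 0))) with hL
    -- flatten A's nested loops
    have h1 : ∀ (i : Int) (g : List Int),
        (PySem.List.pyRange i N 1).foldl (fun g j =>
          (PySem.List.pyRange j N 1).foldl (fun g k =>
            pyIncr g (PySem.List.pyGetD A i 0 + PySem.List.pyGetD A j 0 + PySem.List.pyGetD A k 0)) g) g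
        = ((PySem.List.pyRange i N 1).flatMap (fun j => (PySem.List.pyRange j N 1).map (fun k =>
            PySem.List.pyGetD A i 0 + PySem.List.pyGetD A j 0 + PySem.List.pyGetD A k 0))).foldl pyIncr g := by
      intro i g
      rw [← foldl_foldl]
      simp only [List.foldl_map]
    have hA : (PySem.List.pyRange 0 N 1).foldl (fun g i =>
        (PySem.List.pyRange i N 1).foldl (fun g j =>
          (PySem.List.pyRange j N 1).foldl (fun g k =>
            pyIncr g (PySem.List.pyGetD A i 0 + PySem.List.pyGetD A j 0 + PySem.List.pyGetD A k 0)) g) g) g0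
        = L.foldl pyIncr g0 := by
      calc (PySem.List.pyRange 0 N 1).foldl (fun g i =>
            (PySem.List.pyRange i N 1).foldl (fun g j =>
              (PySem.List.pyRange j N 1).foldl (fun g k =>
                pyIncr g (PySem.List.pyGetD A i 0 + PySem.List.pyGetD A j 0 + PySem.List.pyGetD A k 0)) g) g) g0
          = (PySem.List.pyRange 0 N 1).foldl (fun g i =>
              ((PySem.List.pyRange i N 1).flatMap (fun j => (PySem.List.pyRange j N 1).map (fun k =>
                PySem.List.pyGetD A i 0 + PySem.List.pyGetD A j 0 + PySem.List.pyGetD A k 0))).foldl pyIncr g) g0 := by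
            simp only [h1]
        _ = L.foldl pyIncr g0 := by rw [hL]; exact foldl_foldl _ _ _ _
    have hmemL : ∀ u : Int, u ∈ L ↔ ∃ i j k : Int, 0 ≤ i ∧ i ≤ j ∧ j ≤ k ∧ k < N ∧
        PySem.List.pyGetD A i 0 + PySem.List.pyGetD A j 0 + PySem.List.pyGetD A k 0 = u := by
      intro u
      simp only [hL, List.mem_flatMap, List.mem_map, PySem.List.mem_pyRange_one]
      constructor
      · rintro ⟨i, ⟨hi0, hiN⟩, j, ⟨hj0, hjN⟩, k, ⟨hk0, hkN⟩, rfl⟩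
        exact ⟨i, j, k, hi0, hj0, hk0, hkN, rfl⟩
      · rintro ⟨i, j, k, ha, hb, hc, hd, rfl⟩
        exact ⟨i, ⟨ha, by omega⟩, j, ⟨hb, by omega⟩, k, ⟨hc, hd⟩, rfl⟩
    have hLrange : ∀ x ∈ L, 0 ≤ x ∧ x < (g0.length : Int) := by
      intro x hx
      obtain ⟨i, j, k, ha, hb, hc, hd, rfl⟩ := (hmemL x).mp hx
      obtain ⟨hi0, hi1⟩ := hval i ha (by omega)
      obtain ⟨hj0, hj1⟩ := hval j (by omega) (by omega)
      obtain ⟨hk0, hk1⟩ := hval k (by omega) hd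
      have : g0.length = (mA * 3 + 1).toNat := by simp [hg0]
      rw [this]
      omega
    -- B side: bits of vals
    set vals := (PySem.List.pyRange 0 N 1).foldl
      (fun v i => v ||| (1 <<< (PySem.List.pyGetD A i 0).toNat)) 0 with hvals
    have hbv : ∀ b : Nat, vals.testBit b = true ↔
        ∃ i : Nat, i < N.toNat ∧ (PySem.List.pyGetD A ((0:Int) + (i : Int)) 0).toNat = b := by
      intro b
      rw [hvals, PySem.List.pyRange_one]
      rw [List.foldl_map]
      rw [testBit_foldl_or' (List.range (N - 0).toNat)
        (fun k : Nat => (PySem.List.pyGetD A ((0:Int) + (k : Int)) 0).toNat) 0 b]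
      simp [List.mem_range]
    set s2 := sumsetAux vals vals 0 0 with hs2d
    set s3 := sumsetAux s2 vals 0 0 with hs3d
    have hs3 : ∀ t : Nat, s3.testBit t = true ↔ ∃ a b c : Nat, vals.testBit a = true ∧
        vals.testBit b = true ∧ vals.testBit c = true ∧ a + b + c = t := by
      intro t
      rw [hs3d, testBit_sumsetAux]
      constructor
      · rintro (h | ⟨p, c, hp, hc, hpc⟩)
        · simp at h
        · rw [hs2d, testBit_sumsetAux] at hp
          rcases hp with h | ⟨a, b, ha, hb, hab⟩
          · simp at h
          · exact ⟨a, b, c, ha, hb, hc, by omega⟩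
      · rintro ⟨a, b, c, ha, hb, hc, habc⟩
        exact Or.inr ⟨a + b, c, by
          rw [hs2d, testBit_sumsetAux]
          exact Or.inr ⟨a, b, ha, hb, by omega⟩, hc, by omega⟩
    -- the bridge: membership in L vs bit of s3
    have hbridge : ∀ t : Nat, ((t : Int) ∈ L ↔ s3.testBit t = true) := by
      intro t
      rw [hs3, hmemL]
      constructor
      · rintro ⟨i, j, k, h1', h2', h3', h4', hsum⟩
        obtain ⟨hi0, hi1⟩ := hval i h1' (by omega)
        obtain ⟨hj0, hj1⟩ := hval j (by omega) (by omega)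
        obtain ⟨hk0, hk1⟩ := hval k (by omega) h4'
        refine ⟨(PySem.List.pyGetD A i 0).toNat, (PySem.List.pyGetD A j 0).toNat,
          (PySem.List.pyGetD A k 0).toNat, ?_, ?_, ?_, by omega⟩
        · rw [hbv]
          exact ⟨i.toNat, by omega, by rw [show (0:Int) + (i.toNat : Int) = i by omega]⟩
        · rw [hbv]
          exact ⟨j.toNat, by omega, by rw [show (0:Int) + (j.toNat : Int) = j by omega]⟩
        · rw [hbv]
          exact ⟨k.toNat, by omega, by rw [show (0:Int) + (k.toNat : Int) = k by omega]⟩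
      · rintro ⟨a, b, c, ha, hb, hc, habc⟩
        rw [hbv] at ha hb hc
        obtain ⟨i, hi, hia⟩ := ha
        obtain ⟨j, hj, hjb⟩ := hb
        obtain ⟨k, hk, hkc⟩ := hc
        have hN0 : 0 < N := by omega
        have hvi := hval (i : Int) (by omega) (by omega)
        have hvj := hval (j : Int) (by omega) (by omega)
        have hvk := hval (k : Int) (by omega) (by omega)
        have hcast : ∀ m : Nat, ((0:Int) + (m : Int)) = (m : Int) := by intro m; omega
        rw [hcast] at hia hjb hkc
        obtain ⟨i', j', k', ho1, ho2, ho3, ho4⟩ := exists_ordered_triple N.toNat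
          (fun m : Nat => PySem.List.pyGetD A (m : Int) 0) ((t : Int))
          ⟨i, j, k, hi, hj, hk, by simp only []; omega⟩
        have hk'N : (k' : Int) < N := by omega
        exact ⟨(i' : Int), (j' : Int), (k' : Int), by omega, by omega, by omega, hk'N, ho4⟩
    -- assemble the two counts
    rw [hA]
    rw [PySem.List.slice_to _ (show (0:Int) ≤ W + 1 by omega)]
    have hlen : (L.foldl pyIncr g0).length = (mA * 3 + 1).toNat := by
      rw [foldl_pyIncr_length]; simp [hg0]
    have hwm : (W + 1).toNat ≤ (mA * 3 + 1).toNat := by omega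
    rw [count_zero_take _ _ (by omega)]
    rw [PySem.List.foldl_ite_add_one (fun t : Int => (s3 >>> t.toNat) &&& 1 = 0)]
    rw [PySem.List.pyRange_one]
    rw [List.countP_map]
    have hcnt : List.countP (fun t : Nat => ((L.foldl pyIncr g0)[t]?).getD 0 == 0)
          (List.range (W + 1).toNat)
        = List.countP ((fun t : Int => decide ((s3 >>> t.toNat) &&& 1 = 0)) ∘ (fun k : Nat => (0:Int) + (k : Int)))
          (List.range (W + 1 - 0).toNat) := by
      rw [show (W + 1 - 0) = W + 1 by omega]
      apply List.countP_congr
      intro t ht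
      rw [List.mem_range] at ht
      have hAt := foldl_pyIncr_getD L g0 t (by simp [hg0]; omega)
        (by intro e he; rw [hg0] at he; rw [List.eq_of_mem_replicate he]) hLrange
      have hg0t : ((g0[t]?).getD 0) = 0 := by
        rw [hg0, List.getElem?_replicate, if_pos (by simp; omega)]
        rfl
      have hb1 : ((s3 >>> t) &&& 1 = 0) ↔ ¬ (s3.testBit t = true) := by
        rw [Nat.testBit_eq_decide_div_mod_eq, Nat.and_one_is_mod, Nat.shiftRight_eq_div_pow]
        simp only [decide_eq_true_eq]
        omega
      have hiff : (((L.foldl pyIncr g0)[t]?).getD 0 = 0) ↔ ((s3 >>> t) &&& 1 = 0) := by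
        rw [hAt, hb1, ← hbridge t]
        constructor
        · rintro ⟨-, h⟩; exact h
        · intro h; exact ⟨hg0t, h⟩
      simp only [Function.comp_apply]
      rw [show ((0:Int) + (t : Int)).toNat = t by omega]
      simp [hiff]
    rw [hcnt]
    omega

-- ===== VERDICT (by name: the statement is the Claim_ definition above) =====
theorem find_good_integers_spec : Claim_equal_find_good_integers := by
  intro N W A _ hpre
  unfold Spec_find_good_integers
  exact main_equiv N W A hpre.1 hpre.2
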